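-- pv_equiv track=rewrite | github.com/rei-shell/Phishing-Email-Detection-System | phising email (prototype)/phising email (prototype)/phishing detector system (back end).py | _check_character_substitution
-- ===== SOURCE A (Python) =====
-- def _check_character_substitution(suspicious: str, legitimate: str) -> bool:
--     """Check for common character substitutions in domain spoofing."""
--     substitutions = {
--         'o': '0', 'i': '1', 'l': '1', 'e': '3', 'a': '@',
--         'g': '9', 's': '$', 'b': '6', 't': '7'
--     }
--
--     for char, replacement in substitutions.items():
--         if char in legitimate and replacement in suspicious:
--             test_domain = legitimate.replace(char, replacement)
--             if test_domain == suspicious: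
--                 return True
--
--     return False
-- ===== SOURCE B (Python) =====
-- def _check_character_substitution(suspicious: str, legitimate: str) -> bool:
--     """Check for common character substitutions in domain spoofing."""
--     substitutions = {
--         'o': '0', 'i': '1', 'l': '1', 'e': '3', 'a': '@',
--         'g': '9', 's': '$', 'b': '6', 't': '7'
--     }
--
--     if len(suspicious) != len(legitimate):
--         return False
--     diffs = set()
--     for lc, sc in zip(legitimate, suspicious):
--         if lc != sc:
--             diffs.add((lc, sc))
--     if len(diffs) != 1:
--         return False
--     ((char, repl),) = diffs
--     if substitutions.get(char) != repl:
--         return False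
--     # every occurrence of `char` in legitimate must have been substituted
--     return all(sc == repl for lc, sc in zip(legitimate, suspicious) if lc == char)
-- ===== Notes on version B (the rewrite author's own statement) =====
-- stated objective: alternative
-- what changed: Instead of trying each of the 9 substitution rules and rebuilding legitimate with str.replace to compare against suspicious, B walks the two strings once in parallel, collects the distinct differing character pairs, and accepts iff there is exactly one such pair, it matches the substitution table, and every occurrence of that character was substituted.
import Mathlib
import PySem

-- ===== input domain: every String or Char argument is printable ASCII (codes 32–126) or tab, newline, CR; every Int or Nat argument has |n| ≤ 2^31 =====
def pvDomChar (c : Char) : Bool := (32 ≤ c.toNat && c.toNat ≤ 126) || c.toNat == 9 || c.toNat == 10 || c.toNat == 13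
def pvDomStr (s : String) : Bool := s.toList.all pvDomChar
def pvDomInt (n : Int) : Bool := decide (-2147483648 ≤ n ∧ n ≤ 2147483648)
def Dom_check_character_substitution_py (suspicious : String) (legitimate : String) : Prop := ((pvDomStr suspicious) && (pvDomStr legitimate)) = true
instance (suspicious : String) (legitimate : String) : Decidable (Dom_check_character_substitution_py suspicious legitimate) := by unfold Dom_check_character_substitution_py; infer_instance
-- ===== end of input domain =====

-- B replaces A's try-each-of-9-rules-and-rebuild-with-replace scan by a single parallel walk that
-- collects the distinct differing character pairs and checks the unique pair against the table (alternative decomposition).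


-- the `substitutions` table both Pythons share
def pvSubsTable : PySem.Dict Char Char :=
  PySem.Dict.ofList [('o','0'),('i','1'),('l','1'),('e','3'),('a','@'),('g','9'),('s','$'),('b','6'),('t','7')]

-- ===== PORT A =====
-- `for char, replacement in substitutions.items(): …` with early `return True`
def pvALoop (S L : List Char) : List (Char × Char) → Bool
  | [] => false
  | (ch, rep) :: rest =>
    if PySem.Chars.isIn [ch] L && PySem.Chars.isIn [rep] S then
      if PySem.Chars.replace L [ch] [rep] = S then true
      else pvALoop S L rest
    else pvALoop S L rest

def check_character_substitution_py (suspicious : String) (legitimate : String) : Bool :=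
  pvALoop suspicious.toList legitimate.toList pvSubsTable.items

-- ===== PORT B =====
def check_character_substitution_py_alt (suspicious : String) (legitimate : String) : Bool :=
  let S := suspicious.toList
  let L := legitimate.toList
  if S.length ≠ L.length then false
  else
    -- diffs = { (lc, sc) for lc, sc in zip(legitimate, suspicious) if lc != sc }
    match PySem.Set.ofList ((L.zip S).filter (fun p => p.1 != p.2)) with
    | [(ch, rep)] =>
        (pvSubsTable.get? ch == some rep) &&
        (L.zip S).all (fun p => !(p.1 == ch) || p.2 == rep)
    | _ => false

-- ===== PRECONDITION & SPEC =====
def Spec_check_character_substitution_py (suspicious : String) (legitimate : String) (out : Bool) : Prop := out = check_character_substitution_py_alt suspicious legitimate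
instance (suspicious : String) (legitimate : String) (out : Bool) : Decidable (Spec_check_character_substitution_py suspicious legitimate out) := by unfold Spec_check_character_substitution_py; infer_instance

-- ===== CLAIM (what is proved, stated in full; the proofs are below) =====
def Claim_equal_check_character_substitution_py : Prop := ∀ (suspicious : String) (legitimate : String), Dom_check_character_substitution_py suspicious legitimate → Spec_check_character_substitution_py suspicious legitimate (check_character_substitution_py suspicious legitimate)

-- ===== LEMMAS AND PROOFS =====

-- single-character str.replace is a pointwise map
theorem pv_go_single (c r : Char) :
    ∀ (fuel : Nat) (l acc : List Char), l.length ≤ fuel →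
      PySem.Chars.replace.go [c] [r] fuel l acc
        = acc.reverse ++ l.map (fun x => if x = c then r else x) := by
  intro fuel
  induction fuel with
  | zero =>
    intro l acc h
    have : l = [] := List.eq_nil_of_length_eq_zero (Nat.le_zero.mp h)
    subst this
    simp [PySem.Chars.replace.go]
  | succ n ih =>
    intro l acc h
    cases l with
    | nil => simp [PySem.Chars.replace.go]
    | cons x t =>
      rw [PySem.Chars.replace.go]
      by_cases hx : x = c
      · subst hx
        have hpre : List.isPrefixOf [x] (x :: t) = true := by simp [List.isPrefixOf]
        simp only [hpre, if_pos]
        simp only [List.length_cons] at h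
        rw [ih _ _ (by simpa using Nat.le_of_succ_le_succ h)]
        simp
      · have hpre : List.isPrefixOf [c] (x :: t) = false := by
          simp [List.isPrefixOf]; exact fun hh => absurd hh.symm hx
        simp only [hpre]
        simp only [List.length_cons] at h
        rw [ih _ _ (Nat.le_of_succ_le_succ h)]
        simp [hx]

theorem pv_replace_single (c r : Char) (L : List Char) :
    PySem.Chars.replace L [c] [r] = L.map (fun x => if x = c then r else x) := by
  rw [PySem.Chars.replace]
  simp only [List.isEmpty_cons, if_false, Bool.false_eq_true]
  exact pv_go_single c r L.length L [] (le_refl _)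

theorem pv_isIn_singleton (c : Char) (L : List Char) :
    PySem.Chars.isIn [c] L = true ↔ c ∈ L := by
  rw [PySem.Chars.isIn_iff_infix]; exact List.singleton_infix_iff c L

-- set(xs) is a singleton iff xs is nonempty and constant
theorem pv_ofList_singleton {α : Type} [BEq α] [LawfulBEq α] (xs : List α) (a : α) :
    PySem.Set.ofList xs = [a] ↔ xs ≠ [] ∧ ∀ x ∈ xs, x = a := by
  constructor
  · intro h
    constructor
    · rintro rfl; simp [PySem.Set.ofList, PySem.Set.empty] at h
    · intro x hx
      have : x ∈ PySem.Set.ofList xs := (PySem.Set.mem_ofList xs x).mpr hx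
      rw [h] at this; simpa using this
  · rintro ⟨hne, hall⟩
    induction xs with
    | nil => exact absurd rfl hne
    | cons x t ih =>
      have hx : x = a := hall x (by simp)
      subst hx
      rw [PySem.Set.ofList_cons]
      by_cases ht : t = []
      · subst ht; simp [PySem.Set.ofList, PySem.Set.empty, PySem.Set.discard]
      · rw [ih ht (fun y hy => hall y (by simp [hy]))]
        simp [PySem.Set.discard]

-- A's per-rule success condition, simplified to "c occurs and the pointwise map matches"
def pvP (c r : Char) (L S : List Char) : Prop :=
  c ∈ L ∧ L.map (fun x => if x = c then r else x) = S

theorem pv_cond_iff_P (c r : Char) (L S : List Char) :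
    (PySem.Chars.isIn [c] L = true ∧ PySem.Chars.isIn [r] S = true ∧
      PySem.Chars.replace L [c] [r] = S) ↔ pvP c r L S := by
  rw [pv_isIn_singleton, pv_isIn_singleton, pv_replace_single]
  constructor
  · rintro ⟨h1, _, h3⟩; exact ⟨h1, h3⟩
  · rintro ⟨h1, h2⟩
    refine ⟨h1, ?_, h2⟩
    subst h2
    exact List.mem_map.mpr ⟨c, h1, by simp⟩

theorem pv_aLoop_iff (S L : List Char) (ps : List (Char × Char)) :
    pvALoop S L ps = true ↔ ∃ p ∈ ps, pvP p.1 p.2 L S := by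
  induction ps with
  | nil => simp [pvALoop]
  | cons p rest ih =>
    obtain ⟨ch, rep⟩ := p
    rw [pvALoop]
    by_cases h1 : PySem.Chars.isIn [ch] L && PySem.Chars.isIn [rep] S
    · rw [if_pos h1]
      by_cases h2 : PySem.Chars.replace L [ch] [rep] = S
      · rw [if_pos h2]
        simp only [true_iff]
        refine ⟨(ch, rep), by simp, ?_⟩
        have := Bool.and_eq_true_iff.mp h1
        exact (pv_cond_iff_P ch rep L S).mp ⟨this.1, this.2, h2⟩
      · rw [if_neg h2, ih]
        constructor
        · rintro ⟨q, hq, hP⟩; exact ⟨q, by simp [hq], hP⟩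
        · rintro ⟨q, hq, hP⟩
          rcases List.mem_cons.mp hq with rfl | hq'
          · exact absurd ((pv_cond_iff_P ch rep L S).mpr hP).2.2 h2
          · exact ⟨q, hq', hP⟩
    · rw [if_neg h1, ih]
      constructor
      · rintro ⟨q, hq, hP⟩; exact ⟨q, by simp [hq], hP⟩
      · rintro ⟨q, hq, hP⟩
        rcases List.mem_cons.mp hq with rfl | hq'
        · obtain ⟨hc, hr, _⟩ := (pv_cond_iff_P ch rep L S).mpr hP
          exact absurd (by rw [Bool.and_eq_true_iff]; exact ⟨hc, hr⟩) h1
        · exact ⟨q, hq', hP⟩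

-- the heart: A's condition for a fixed rule (c, r), c ≠ r, equals B's diff-pair analysis
theorem pv_P_iff (c r : Char) (hcr : c ≠ r) (L S : List Char) :
    pvP c r L S ↔
      (S.length = L.length ∧
       PySem.Set.ofList ((L.zip S).filter (fun p => p.1 != p.2)) = [(c, r)] ∧
       ∀ p ∈ L.zip S, p.1 = c → p.2 = r) := by
  rw [pv_ofList_singleton]
  constructor
  · rintro ⟨hc, hmap⟩
    subst hmap
    have hzip : L.zip (L.map (fun x => if x = c then r else x))
        = L.map (fun x => (x, if x = c then r else x)) := by
      have := @List.zip_map' Char Char Char (fun x : Char => x) (fun x => if x = c then r else x) L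
      simpa using this
    refine ⟨by simp, ⟨?_, ?_⟩, ?_⟩
    · intro hnil
      rw [hzip] at hnil
      have : (c, if c = c then r else c) ∈ (L.map (fun x => (x, if x = c then r else x))).filter
          (fun p => p.1 != p.2) := by
        refine List.mem_filter.mpr ⟨List.mem_map.mpr ⟨c, hc, rfl⟩, ?_⟩
        simp [hcr]
      rw [hnil] at this; simp at this
    · intro p hp
      rw [hzip] at hp
      obtain ⟨hp1, hp2⟩ := List.mem_filter.mp hp
      obtain ⟨x, hx, rfl⟩ := List.mem_map.mp hp1
      by_cases hxc : x = c
      · simp [hxc]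
      · simp [hxc] at hp2
    · intro p hp h1
      rw [hzip] at hp
      obtain ⟨x, hx, rfl⟩ := List.mem_map.mp hp
      simp at h1; simp [h1]
  · rintro ⟨hlen, ⟨hne, hall⟩, hcond⟩
    constructor
    · obtain ⟨p, hp⟩ := List.exists_mem_of_ne_nil _ hne
      have hp' := hall p hp
      subst hp'
      obtain ⟨hpz, _⟩ := List.mem_filter.mp hp
      exact (List.of_mem_zip hpz).1
    · apply List.ext_getElem (by simp [hlen])
      intro i hi1 hi2
      have hiL : i < L.length := by simpa using hi1
      have hiz : i < (L.zip S).length := by simp; omega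
      have hmem : (L[i], S[i]) ∈ L.zip S := by
        have := List.getElem_mem hiz
        rwa [List.getElem_zip] at this
      simp only [List.getElem_map]
      by_cases hxc : L[i] = c
      · rw [if_pos hxc]
        exact (hcond _ hmem hxc).symm
      · rw [if_neg hxc]
        by_contra hne'
        have hdiff : (L[i], S[i]) ∈ (L.zip S).filter (fun p => p.1 != p.2) := by
          refine List.mem_filter.mpr ⟨hmem, ?_⟩
          simp
          intro h; exact hne' h
        have := hall _ hdiff
        simp at this
        exact hxc this.1

theorem pv_alt_iff (suspicious legitimate : String) :
    check_character_substitution_py_alt suspicious legitimate = true ↔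
      ∃ c r, pvSubsTable.get? c = some r ∧
        (suspicious.toList.length = legitimate.toList.length ∧
         PySem.Set.ofList ((legitimate.toList.zip suspicious.toList).filter (fun p => p.1 != p.2)) = [(c, r)] ∧
         ∀ p ∈ legitimate.toList.zip suspicious.toList, p.1 = c → p.2 = r) := by
  unfold check_character_substitution_py_alt
  set S := suspicious.toList with hS
  set L := legitimate.toList with hL
  by_cases hlen : S.length = L.length
  · rw [if_neg (by simpa using hlen)]
    rcases hF : PySem.Set.ofList ((L.zip S).filter (fun p => p.1 != p.2)) with _ | ⟨⟨c, r⟩, rest⟩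
    · rw [hF]
      constructor
      · intro h; simp at h
      · rintro ⟨c, r, _, _, hsing, _⟩; simp at hsing
    · cases rest with
      | nil =>
        rw [hF]
        simp only [Bool.and_eq_true, beq_iff_eq, List.all_eq_true]
        constructor
        · rintro ⟨hget, hall⟩
          refine ⟨c, r, hget, hlen, rfl, ?_⟩
          intro p hp h1
          have := hall p hp
          simp [h1] at this
          exact this
        · rintro ⟨c', r', hget, _, hsing, hcond⟩
          obtain ⟨h1, h2⟩ : c = c' ∧ r = r' := by
            simp at hsing; exact hsing
          subst h1; subst h2
          refine ⟨hget, ?_⟩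
          intro p hp
          by_cases hpc : p.1 = c
          · simp [hpc, hcond p hp hpc]
          · simp [hpc]
      | cons q rest' =>
        rw [hF]
        constructor
        · intro h; simp at h
        · rintro ⟨c', r', _, _, hsing, _⟩; simp at hsing
  · rw [if_pos (by simpa using hlen)]
    constructor
    · intro h; simp at h
    · rintro ⟨_, _, _, hl, _⟩; exact absurd hl hlen

-- ===== VERDICT (by name: the statement is the Claim_ definition above) =====
theorem check_character_substitution_py_spec : Claim_equal_check_character_substitution_py := by
  intro suspicious legitimate _
  unfold Spec_check_character_substitution_py
  rw [← Bool.coe_iff_coe]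
  rw [pv_alt_iff]
  unfold check_character_substitution_py
  rw [pv_aLoop_iff]
  constructor
  · rintro ⟨⟨c, r⟩, hmem, hP⟩
    have hget : pvSubsTable.get? c = some r :=
      (PySem.Dict.get?_eq_some_iff_mem_items pvSubsTable c r (by decide)).mpr hmem
    have hcr : c ≠ r := by
      have : ∀ p ∈ pvSubsTable.items, p.1 ≠ p.2 := by decide
      exact this _ hmem
    exact ⟨c, r, hget, (pv_P_iff c r hcr _ _).mp hP⟩
  · rintro ⟨c, r, hget, hB⟩
    have hmem : (c, r) ∈ pvSubsTable.items :=
      (PySem.Dict.get?_eq_some_iff_mem_items pvSubsTable c r (by decide)).mp hget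
    have hcr : c ≠ r := by
      have : ∀ p ∈ pvSubsTable.items, p.1 ≠ p.2 := by decide
      exact this _ hmem
    exact ⟨(c, r), hmem, (pv_P_iff c r hcr _ _).mpr hB⟩
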